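-- pv_equiv track=rewrite | github.com/seyoungsong/hanja-platform | backend/tool/ner.py | _iob2xml
-- ===== SOURCE A (Python) =====
-- NER_PREFIX = "▪"  # prefix for inline XML tags
--
-- def _iob2xml(tokens: list[str], ner_tags: list[str]) -> str:
--     """Convert IOB tags to XML format."""
--     assert len(tokens) == len(ner_tags), "not equal in length"
--
--     result: list[str] = []
--     open_tag: str | None = None
--
--     for token, tag in zip(tokens, ner_tags, strict=True):
--         if tag.startswith("B-"):
--             if open_tag:
--                 result.append(f"</{open_tag}>")
--             open_tag = NER_PREFIX + tag[2:]
--             result.append(f"<{open_tag}>{token}")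
--         elif tag.startswith("I-") and open_tag:
--             result.append(f"{token}")
--         else:
--             if open_tag:
--                 result.append(f"</{open_tag}>{token}")
--                 open_tag = None
--             else:
--                 result.append(token)
--
--     if open_tag:
--         result.append(f"</{open_tag}>")
--
--     return "".join(result)
-- ===== SOURCE B (Python) =====
-- NER_PREFIX = "▪"  # prefix for inline XML tags
--
--
-- def _iob2xml(tokens: list, ner_tags: list) -> str:
--     """Convert IOB tags to XML format: chunk first, render second."""
--     assert len(tokens) == len(ner_tags), "not equal in length"
--
--     # First pass: group tokens into chunks (entity_name_or_None, [tokens]).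
--     chunks: list = []
--     for token, tag in zip(tokens, ner_tags):
--         if tag.startswith("B-"):
--             chunks.append((NER_PREFIX + tag[2:], [token]))
--         elif tag.startswith("I-") and chunks and chunks[-1][0] is not None:
--             chunks[-1][1].append(token)
--         else:
--             chunks.append((None, [token]))
--
--     # Second pass: render each chunk.
--     return "".join(
--         f"<{name}>{''.join(toks)}</{name}>" if name is not None else "".join(toks)
--         for name, toks in chunks
--     )
-- ===== Notes on version B (the rewrite author's own statement) =====
-- stated objective: simpler
-- what changed: Replaces A's single stateful emit-as-you-go loop (open_tag flag, tag fragments interleaved into the output list) with a two-pass design: first group tokens into chunks (entity-or-None, tokens), then render each chunk as a complete span; same O(n) cost.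
import Mathlib
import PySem

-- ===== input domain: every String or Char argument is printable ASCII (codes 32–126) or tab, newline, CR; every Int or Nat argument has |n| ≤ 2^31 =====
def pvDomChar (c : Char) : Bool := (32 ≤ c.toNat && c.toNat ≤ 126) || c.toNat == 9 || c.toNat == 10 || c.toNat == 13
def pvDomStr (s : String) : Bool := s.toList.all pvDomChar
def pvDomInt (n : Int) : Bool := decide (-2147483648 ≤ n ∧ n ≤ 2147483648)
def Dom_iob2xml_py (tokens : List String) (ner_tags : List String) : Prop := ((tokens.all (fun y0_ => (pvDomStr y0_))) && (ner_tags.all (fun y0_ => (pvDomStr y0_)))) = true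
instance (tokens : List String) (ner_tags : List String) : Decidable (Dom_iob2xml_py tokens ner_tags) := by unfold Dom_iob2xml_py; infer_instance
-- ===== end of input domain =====

-- B groups tokens into chunks first and renders them second, instead of A's stateful emit-as-you-go loop; objective: simpler.

-- ===== PORT A =====
-- Python truthiness of the `open_tag: str | None` variable
def pvTruthy (o : Option String) : Bool :=
  match o with
  | none => false
  | some s => s != ""

-- one iteration of A's loop; state = (result, open_tag)
def pvStepA (st : List String × Option String) (p : String × String) : List String × Option String :=
  if PySem.Str.startswith p.2 "B-" then
    let result := if pvTruthy st.2 then st.1 ++ ["</" ++ st.2.getD "" ++ ">"] else st.1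
    let ot := "▪" ++ PySem.Str.slice p.2 (some 2) none
    (result ++ ["<" ++ ot ++ ">" ++ p.1], some ot)
  else if PySem.Str.startswith p.2 "I-" && pvTruthy st.2 then
    (st.1 ++ [p.1], st.2)
  else
    if pvTruthy st.2 then (st.1 ++ ["</" ++ st.2.getD "" ++ ">" ++ p.1], none)
    else (st.1 ++ [p.1], st.2)

def iob2xml_py (tokens : List String) (ner_tags : List String) : String :=
  let st := (tokens.zip ner_tags).foldl pvStepA ([], none)
  let result := if pvTruthy st.2 then st.1 ++ ["</" ++ st.2.getD "" ++ ">"] else st.1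
  PySem.Str.join "" result

-- ===== PORT B =====
-- render one chunk (entity-or-None, tokens)
def pvRender (c : Option String × List String) : String :=
  match c.1 with
  | some n => "<" ++ n ++ ">" ++ PySem.Str.join "" c.2 ++ "</" ++ n ++ ">"
  | none => PySem.Str.join "" c.2

-- one iteration of B's first pass; chunks kept in reverse (list append = cons, chunks[-1] = head)
def pvStepB (chunks : List (Option String × List String)) (p : String × String) :
    List (Option String × List String) :=
  if PySem.Str.startswith p.2 "B-" then
    (some ("▪" ++ PySem.Str.slice p.2 (some 2) none), [p.1]) :: chunks
  else
    match chunks with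
    | (some n, toks) :: rest =>
        if PySem.Str.startswith p.2 "I-" then (some n, toks ++ [p.1]) :: rest
        else (none, [p.1]) :: chunks
    | _ => (none, [p.1]) :: chunks

def iob2xml_py_alt (tokens : List String) (ner_tags : List String) : String :=
  let chunks := ((tokens.zip ner_tags).foldl pvStepB []).reverse
  PySem.Str.join "" (chunks.map pvRender)

-- ===== PRECONDITION & SPEC =====
-- A's assert (and zip strict=True) raise AssertionError on unequal lengths; Pre_ excludes exactly those inputs.
def Pre_iob2xml_py (tokens : List String) (ner_tags : List String) : Prop :=
  tokens.length = ner_tags.length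
instance (tokens : List String) (ner_tags : List String) : Decidable (Pre_iob2xml_py tokens ner_tags) := by unfold Pre_iob2xml_py; infer_instance
def pvWitness_iob2xml_py : List String × List String := (["Kim", "x"], ["B-PER", "O"])

def Spec_iob2xml_py (tokens : List String) (ner_tags : List String) (out : String) : Prop := out = iob2xml_py_alt tokens ner_tags
instance (tokens : List String) (ner_tags : List String) (out : String) : Decidable (Spec_iob2xml_py tokens ner_tags out) := by unfold Spec_iob2xml_py; infer_instance

-- ===== CLAIM (what is proved, stated in full; the proofs are below) =====
def Claim_equal_iob2xml_py : Prop := ∀ (tokens : List String) (ner_tags : List String), Dom_iob2xml_py tokens ner_tags → Pre_iob2xml_py tokens ner_tags → Spec_iob2xml_py tokens ner_tags (iob2xml_py tokens ner_tags)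

-- ===== LEMMAS AND PROOFS =====

-- the simulation invariant between A's loop state and B's reversed chunk list
def pvInv (st : List String × Option String) (cs : List (Option String × List String)) : Prop :=
  match st.2, cs with
  | none, cs =>
      PySem.Str.join "" st.1 = PySem.Str.join "" ((cs.reverse).map pvRender) ∧
      (match cs with | (some _, _) :: _ => False | _ => True)
  | some t, (some t', toks) :: rest =>
      t = t' ∧ t ≠ "" ∧
      PySem.Str.join "" st.1 =
        PySem.Str.join "" ((rest.reverse).map pvRender) ++ ("<" ++ t ++ ">" ++ PySem.Str.join "" toks)
  | some _, _ => False

theorem pv_join_nil : PySem.Str.join "" [] = "" := by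
  rw [← String.toList_inj]; simp [PySem.Str.toList_join, PySem.Chars.join_nil]

theorem pv_join_cons (x : String) (l : List String) :
    PySem.Str.join "" (x :: l) = x ++ PySem.Str.join "" l := by
  rw [← String.toList_inj]
  cases l with
  | nil => simp [PySem.Str.toList_join, PySem.Chars.join_nil, PySem.Chars.join_singleton]
  | cons y r =>
      simp [PySem.Str.toList_join, PySem.Chars.join_cons_cons, String.toList_append]

theorem pv_join_append (a b : List String) :
    PySem.Str.join "" (a ++ b) = PySem.Str.join "" a ++ PySem.Str.join "" b := by
  induction a with
  | nil => simp [pv_join_nil]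
  | cons x a ih => simp [pv_join_cons, ih, String.append_assoc]


theorem pv_step (st : List String × Option String) (cs : List (Option String × List String))
    (p : String × String) (h : pvInv st cs) : pvInv (pvStepA st p) (pvStepB cs p) := by
  obtain ⟨res, ot⟩ := st
  obtain ⟨tok, tag⟩ := p
  cases ot with
  | none =>
    simp only [pvInv] at h
    obtain ⟨he, hh⟩ := h
    rcases cs with _ | ⟨⟨on, toks⟩, rest⟩
    · by_cases hB : PySem.Str.startswith tag "B-" <;>
        by_cases hI : PySem.Str.startswith tag "I-" <;>
        simp only [PySem.Str.startswith_eq, show ("B-".toList = ['B','-']) from rfl, show ("I-".toList = ['I','-']) from rfl] at hB hI <;>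
        simp [pvInv, pvStepA, pvStepB, pvTruthy, pvRender, hB, hI, he,
          pv_join_append, pv_join_cons, pv_join_nil, String.append_assoc]
    · cases on with
      | some t' => exact hh.elim
      | none =>
        by_cases hB : PySem.Str.startswith tag "B-" <;>
          by_cases hI : PySem.Str.startswith tag "I-" <;>
          simp only [PySem.Str.startswith_eq, show ("B-".toList = ['B','-']) from rfl, show ("I-".toList = ['I','-']) from rfl] at hB hI <;>
          simp [pvInv, pvStepA, pvStepB, pvTruthy, pvRender, hB, hI, he,
            pv_join_append, pv_join_cons, pv_join_nil, String.append_assoc]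
  | some t =>
    rcases cs with _ | ⟨⟨on, toks⟩, rest⟩
    · simp only [pvInv] at h
    · cases on with
      | none => simp only [pvInv] at h
      | some t' =>
        simp only [pvInv] at h
        obtain ⟨ht, hne, he⟩ := h
        subst ht
        by_cases hB : PySem.Str.startswith tag "B-" <;>
          by_cases hI : PySem.Str.startswith tag "I-" <;>
          simp only [PySem.Str.startswith_eq, show ("B-".toList = ['B','-']) from rfl, show ("I-".toList = ['I','-']) from rfl] at hB hI <;>
          simp [pvInv, pvStepA, pvStepB, pvTruthy, pvRender, hB, hI, he, hne,
            pv_join_append, pv_join_cons, pv_join_nil, String.append_assoc]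

theorem pv_final (st : List String × Option String) (cs : List (Option String × List String))
    (h : pvInv st cs) :
    PySem.Str.join "" (if pvTruthy st.2 then st.1 ++ ["</" ++ st.2.getD "" ++ ">"] else st.1) =
      PySem.Str.join "" ((cs.reverse).map pvRender) := by
  obtain ⟨res, ot⟩ := st
  cases ot with
  | none =>
      simp only [pvInv] at h
      simpa [pvTruthy] using h.1
  | some t =>
      rcases cs with _ | ⟨⟨on, toks⟩, rest⟩
      · simp only [pvInv] at h
      · cases on with
        | none => simp only [pvInv] at h
        | some t' =>
          simp only [pvInv] at h
          obtain ⟨ht, hne, he⟩ := h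
          subst ht
          simp [pvTruthy, hne, pvRender, he, pv_join_append, pv_join_cons,
            pv_join_nil, String.append_assoc]

theorem pv_fold (l : List (String × String)) (st : List String × Option String)
    (cs : List (Option String × List String)) (h : pvInv st cs) :
    pvInv (l.foldl pvStepA st) (l.foldl pvStepB cs) := by
  induction l generalizing st cs with
  | nil => exact h
  | cons p l ih => exact ih _ _ (pv_step st cs p h)

-- ===== VERDICT (by name: the statement is the Claim_ definition above) =====
theorem iob2xml_py_spec : Claim_equal_iob2xml_py := by
  intro tokens ner_tags _ _
  unfold Spec_iob2xml_py iob2xml_py iob2xml_py_alt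
  exact pv_final _ _ (pv_fold (tokens.zip ner_tags) ([], none) [] (by simp [pvInv, pv_join_nil]))
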